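-- pv_equiv track=rewrite | github.com/MrBrantCode/unitest_baseline | mut_generate/mist_train_cf/cf_7571/solution.py | combine_and_sort_lists
-- ===== SOURCE A (Python) =====
-- def combine_and_sort_lists(list1, list2):
--     combined_list = list1 + list2
--     unique_list = []
--
--     for element in combined_list:
--         if element not in unique_list:
--             unique_list.append(element)
--
--     for i in range(len(unique_list)):
--         for j in range(i + 1, len(unique_list)):
--             if unique_list[i] < unique_list[j]:
--                 unique_list[i], unique_list[j] = unique_list[j], unique_list[i]
--
--     return unique_list
-- ===== SOURCE B (Python) =====
-- def combine_and_sort_lists(list1, list2):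
--     result = []
--     for x in sorted(list1 + list2, reverse=True):
--         if not result or x != result[-1]:
--             result.append(x)
--     return result
-- ===== Notes on version B (the rewrite author's own statement) =====
-- stated objective: faster
-- what changed: Replaces A's quadratic membership-scan dedup followed by a quadratic in-place swap sort with one sorted(combined, reverse=True) call and a single linear pass that keeps an element only when it differs from the last kept one.
import Mathlib
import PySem

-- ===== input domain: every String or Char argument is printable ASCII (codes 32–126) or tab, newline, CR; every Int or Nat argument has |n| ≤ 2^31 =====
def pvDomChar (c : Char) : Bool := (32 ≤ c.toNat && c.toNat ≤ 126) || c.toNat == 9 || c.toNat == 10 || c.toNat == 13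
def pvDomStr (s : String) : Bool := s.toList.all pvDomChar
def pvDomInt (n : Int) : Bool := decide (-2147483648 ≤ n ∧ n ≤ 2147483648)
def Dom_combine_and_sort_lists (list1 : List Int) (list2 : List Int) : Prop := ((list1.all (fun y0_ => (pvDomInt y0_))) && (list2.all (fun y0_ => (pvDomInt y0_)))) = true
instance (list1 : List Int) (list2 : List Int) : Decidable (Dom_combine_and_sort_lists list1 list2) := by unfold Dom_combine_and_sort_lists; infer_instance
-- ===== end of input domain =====

-- B replaces A's quadratic membership-scan dedup + quadratic in-place swap sort by one
-- descending sort plus a linear adjacent-difference pass.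

-- ===== PORT A =====
-- literal port: first-occurrence dedup by membership scan, then the nested index/swap loops;
-- every index the ranges produce is nonnegative and in range, so pyGetD/.set/.toNat are exact there
def combine_and_sort_lists (list1 : List Int) (list2 : List Int) : List Int :=
  let combined := list1 ++ list2
  let unique := combined.foldl (fun acc e => if e ∈ acc then acc else acc ++ [e]) []
  (PySem.List.pyRange 0 (unique.length : Int) 1).foldl
    (fun l i =>
      (PySem.List.pyRange (i + 1) ((l.length : Int)) 1).foldl
        (fun l2 j =>
          if PySem.List.pyGetD l2 i 0 < PySem.List.pyGetD l2 j 0 then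
            (l2.set i.toNat (PySem.List.pyGetD l2 j 0)).set j.toNat (PySem.List.pyGetD l2 i 0)
          else l2)
        l)
    unique

-- ===== PORT B =====
def combine_and_sort_lists_alt (list1 : List Int) (list2 : List Int) : List Int :=
  (PySem.List.sorted (list1 ++ list2) (fun x => x) true).foldl
    (fun res x =>
      if res = [] ∨ x ≠ PySem.List.pyGetD res (-1) 0 then res ++ [x] else res)
    []

-- ===== PRECONDITION & SPEC =====
def Spec_combine_and_sort_lists (list1 : List Int) (list2 : List Int) (out : List Int) : Prop := out = combine_and_sort_lists_alt list1 list2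
instance (list1 : List Int) (list2 : List Int) (out : List Int) : Decidable (Spec_combine_and_sort_lists list1 list2 out) := by unfold Spec_combine_and_sort_lists; infer_instance

-- ===== CLAIM (what is proved, stated in full; the proofs are below) =====
def Claim_equal_combine_and_sort_lists : Prop := ∀ (list1 : List Int) (list2 : List Int), Dom_combine_and_sort_lists list1 list2 → Spec_combine_and_sort_lists list1 list2 (combine_and_sort_lists list1 list2)

-- ===== LEMMAS AND PROOFS =====

-- structural form of A's inner loop: bubble the max of (p :: suf) to the pivot slot
def fmax (p : Int) : List Int → Int × List Int
  | [] => (p, [])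
  | x :: xs =>
    if p < x then let r := fmax x xs; (r.1, p :: r.2)
    else let r := fmax p xs; (r.1, x :: r.2)

lemma fmax_len (p : Int) (xs : List Int) : (fmax p xs).2.length = xs.length := by
  induction xs generalizing p with
  | nil => rfl
  | cons x xs ih => simp only [fmax]; split_ifs <;> simp [ih]

-- structural form of A's outer loop: selection sort (descending)
def selSort : List Int → List Int
  | [] => []
  | p :: xs => (fmax p xs).1 :: selSort (fmax p xs).2
termination_by l => l.length
decreasing_by simp [fmax_len]

lemma fmax_perm (p : Int) (xs : List Int) :
    ((fmax p xs).1 :: (fmax p xs).2).Perm (p :: xs) := by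
  induction xs generalizing p with
  | nil => simp [fmax]
  | cons x xs ih =>
    simp only [fmax]; split_ifs with h
    · exact (List.Perm.swap p (fmax x xs).1 (fmax x xs).2).trans (List.Perm.cons p (ih x))
    · exact ((List.Perm.swap x (fmax p xs).1 (fmax p xs).2).trans
        (List.Perm.cons x (ih p))).trans (List.Perm.swap p x xs)

lemma fmax_le_fst (p : Int) (xs : List Int) : p ≤ (fmax p xs).1 := by
  induction xs generalizing p with
  | nil => simp [fmax]
  | cons x xs ih =>
    simp only [fmax]; split_ifs with h
    · exact le_of_lt (lt_of_lt_of_le h (ih x))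
    · exact ih p

lemma fmax_snd_le (p : Int) (xs : List Int) :
    ∀ y ∈ (fmax p xs).2, y ≤ (fmax p xs).1 := by
  induction xs generalizing p with
  | nil => simp [fmax]
  | cons x xs ih =>
    simp only [fmax]; split_ifs with h
    · intro y hy
      rcases List.mem_cons.mp hy with rfl | hy
      · exact le_of_lt (lt_of_lt_of_le h (fmax_le_fst x xs))
      · exact ih x y hy
    · intro y hy
      rcases List.mem_cons.mp hy with rfl | hy
      · exact le_trans (not_lt.mp h) (fmax_le_fst p xs)
      · exact ih p y hy

lemma selSort_perm (l : List Int) : (selSort l).Perm l := by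
  match l with
  | [] => simp [selSort]
  | p :: xs =>
    have ih := selSort_perm (fmax p xs).2
    rw [selSort]
    exact (List.Perm.cons (fmax p xs).1 ih).trans (fmax_perm p xs)
termination_by l.length
decreasing_by simp [fmax_len]

lemma selSort_pairwise (l : List Int) (h : l.Nodup) :
    (selSort l).Pairwise (· > ·) := by
  match l with
  | [] => simp [selSort]
  | p :: xs =>
    have hnd : ((fmax p xs).1 :: (fmax p xs).2).Nodup := ((fmax_perm p xs).nodup_iff).mpr h
    have hys : (fmax p xs).2.Nodup := (List.nodup_cons.mp hnd).2
    have hq : (fmax p xs).1 ∉ (fmax p xs).2 := (List.nodup_cons.mp hnd).1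
    have ihp := selSort_pairwise (fmax p xs).2 hys
    rw [selSort]
    refine List.pairwise_cons.mpr ⟨fun y hy => ?_, ihp⟩
    have hymem : y ∈ (fmax p xs).2 := (selSort_perm _).mem_iff.mp hy
    exact lt_of_le_of_ne (fmax_snd_le p xs y hymem) (fun he => hq (he ▸ hymem))
termination_by l.length
decreasing_by simp [fmax_len]

-- positional helpers for the index/swap port
lemma getD_mid (pre t : List Int) (p d : Int) :
    (pre ++ (p :: t)).getD pre.length d = p := by
  induction pre with
  | nil => rfl
  | cons a pre ih => simpa using ih

lemma set_mid (pre t : List Int) (p v : Int) :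
    (pre ++ (p :: t)).set pre.length v = pre ++ (v :: t) := by
  induction pre with
  | nil => rfl
  | cons a pre ih => simp [ih]

-- one step of A's inner loop at pivot position pre.length and scan position pre.length+1+mid.length
lemma step_eval (pre mid t : List Int) (p x : Int) :
    (if PySem.List.pyGetD (pre ++ (p :: (mid ++ (x :: t)))) ((pre.length : Int)) 0 <
        PySem.List.pyGetD (pre ++ (p :: (mid ++ (x :: t)))) ((pre.length : Int) + 1 + (mid.length : Int)) 0 then
      (((pre ++ (p :: (mid ++ (x :: t)))).set ((pre.length : Int)).toNat
          (PySem.List.pyGetD (pre ++ (p :: (mid ++ (x :: t)))) ((pre.length : Int) + 1 + (mid.length : Int)) 0)).set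
        ((pre.length : Int) + 1 + (mid.length : Int)).toNat
        (PySem.List.pyGetD (pre ++ (p :: (mid ++ (x :: t)))) ((pre.length : Int)) 0))
    else (pre ++ (p :: (mid ++ (x :: t)))))
    = if p < x then pre ++ (x :: (mid ++ (p :: t))) else pre ++ (p :: (mid ++ (x :: t))) := by
  have hj : ((pre.length : Int) + 1 + (mid.length : Int)) = (((pre ++ (p :: mid)).length : Nat) : Int) := by
    push_cast [List.length_append, List.length_cons]; ring
  have ha : PySem.List.pyGetD (pre ++ (p :: (mid ++ (x :: t)))) ((pre.length : Int)) 0 = p := by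
    rw [PySem.List.pyGetD_natCast]; exact getD_mid pre (mid ++ (x :: t)) p 0
  have hb : PySem.List.pyGetD (pre ++ (p :: (mid ++ (x :: t)))) ((pre.length : Int) + 1 + (mid.length : Int)) 0 = x := by
    rw [hj, PySem.List.pyGetD_natCast]
    have hassoc : pre ++ (p :: (mid ++ (x :: t))) = (pre ++ (p :: mid)) ++ (x :: t) := by simp
    rw [hassoc]; exact getD_mid (pre ++ (p :: mid)) t x 0
  rw [ha, hb, hj]
  simp only [Int.toNat_natCast]
  split_ifs with h
  · rw [set_mid pre (mid ++ (x :: t)) p x]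
    have h2 : pre ++ (x :: (mid ++ (x :: t))) = (pre ++ (x :: mid)) ++ (x :: t) := by simp
    have h3 : (pre ++ (p :: mid)).length = (pre ++ (x :: mid)).length := by simp
    rw [h2, h3, set_mid (pre ++ (x :: mid)) t x p]
    simp
  · rfl

-- A's inner loop over j = i+1 .. n-1 realises fmax on the untouched suffix
lemma inner_eq (pre : List Int) : ∀ (suf mid : List Int) (p : Int),
    (PySem.List.pyRange ((pre.length : Int) + 1 + (mid.length : Int))
        (((pre ++ (p :: (mid ++ suf))).length : Nat) : Int) 1).foldl
      (fun l2 j =>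
        if PySem.List.pyGetD l2 ((pre.length : Int)) 0 < PySem.List.pyGetD l2 j 0 then
          (l2.set ((pre.length : Int)).toNat (PySem.List.pyGetD l2 j 0)).set j.toNat
            (PySem.List.pyGetD l2 ((pre.length : Int)) 0)
        else l2)
      (pre ++ (p :: (mid ++ suf)))
    = pre ++ ((fmax p suf).1 :: (mid ++ (fmax p suf).2)) := by
  intro suf
  induction suf with
  | nil =>
    intro mid p
    rw [PySem.List.pyRange_one_eq_nil
      (by push_cast [List.length_append, List.length_cons, List.length_nil]; omega)]
    simp [fmax]
  | cons x t ih =>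
    intro mid p
    rw [PySem.List.pyRange_one_cons
      (by push_cast [List.length_append, List.length_cons]; omega), List.foldl_cons]
    beta_reduce
    rw [step_eval pre mid t p x]
    by_cases h : p < x
    · rw [if_pos h]
      have e1 : pre ++ (x :: (mid ++ (p :: t))) = pre ++ (x :: ((mid ++ [p]) ++ t)) := by simp
      have e2 : ((pre.length : Int) + 1 + (mid.length : Int)) + 1
          = (pre.length : Int) + 1 + (((mid ++ [p]).length : Nat) : Int) := by
        push_cast [List.length_append, List.length_cons, List.length_nil]; ring
      have e3 : (((pre ++ (p :: (mid ++ (x :: t)))).length : Nat) : Int)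
          = (((pre ++ (x :: ((mid ++ [p]) ++ t))).length : Nat) : Int) := by
        push_cast [List.length_append, List.length_cons, List.length_nil]; ring
      rw [e1, e2, e3, ih (mid ++ [p]) x]
      simp [fmax, h]
    · rw [if_neg h]
      have e1 : pre ++ (p :: (mid ++ (x :: t))) = pre ++ (p :: ((mid ++ [x]) ++ t)) := by simp
      have e2 : ((pre.length : Int) + 1 + (mid.length : Int)) + 1
          = (pre.length : Int) + 1 + (((mid ++ [x]).length : Nat) : Int) := by
        push_cast [List.length_append, List.length_cons, List.length_nil]; ring
      have e3 : (((pre ++ (p :: (mid ++ (x :: t)))).length : Nat) : Int)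
          = (((pre ++ (p :: ((mid ++ [x]) ++ t))).length : Nat) : Int) := by
        push_cast [List.length_append, List.length_cons, List.length_nil]; ring
      rw [e1] at e3
      rw [e1, e2, e3, ih (mid ++ [x]) p]
      simp [fmax, h]

-- A's outer loop realises selection sort on the unsorted tail
lemma outer_eq (fuel : Nat) : ∀ (done rest : List Int), rest.length ≤ fuel →
    (PySem.List.pyRange ((done.length : Int)) (((done.length + rest.length : Nat) : Int)) 1).foldl
      (fun l i =>
        (PySem.List.pyRange (i + 1) ((l.length : Int)) 1).foldl
          (fun l2 j =>
            if PySem.List.pyGetD l2 i 0 < PySem.List.pyGetD l2 j 0 then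
              (l2.set i.toNat (PySem.List.pyGetD l2 j 0)).set j.toNat (PySem.List.pyGetD l2 i 0)
            else l2)
          l)
      (done ++ rest)
    = done ++ selSort rest := by
  induction fuel with
  | zero =>
    intro done rest hle
    have : rest = [] := List.length_eq_zero_iff.mp (Nat.le_zero.mp hle)
    subst this
    rw [PySem.List.pyRange_one_eq_nil (by push_cast [List.length_nil]; omega)]
    simp [selSort]
  | succ m ih =>
    intro done rest hle
    match rest with
    | [] =>
      rw [PySem.List.pyRange_one_eq_nil (by push_cast [List.length_nil]; omega)]
      simp [selSort]
    | p :: suf =>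
      rw [PySem.List.pyRange_one_cons (by push_cast [List.length_cons]; omega), List.foldl_cons]
      have hinner := inner_eq done suf [] p
      simp only [List.nil_append, List.length_nil, Nat.cast_zero, add_zero] at hinner
      rw [hinner]
      have hq := fmax_len p suf
      have e1 : done ++ ((fmax p suf).1 :: (fmax p suf).2)
          = (done ++ [(fmax p suf).1]) ++ (fmax p suf).2 := by simp
      have e2 : ((done.length : Int) + 1) = (((done ++ [(fmax p suf).1]).length : Nat) : Int) := by
        push_cast [List.length_append, List.length_cons, List.length_nil]; ring
      have e3 : (done.length + (p :: suf).length)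
          = ((done ++ [(fmax p suf).1]).length + (fmax p suf).2.length) := by
        simp only [List.length_append, List.length_cons, List.length_nil, hq]
        omega
      rw [e1, e2, e3, ih (done ++ [(fmax p suf).1]) (fmax p suf).2
        (by rw [hq]; simpa [Nat.succ_le_succ_iff] using hle)]
      rw [selSort]
      simp

-- A's first loop: membership-scan dedup
lemma dedup_mem (xs : List Int) : ∀ (acc : List Int) (z : Int),
    (z ∈ xs.foldl (fun acc e => if e ∈ acc then acc else acc ++ [e]) acc ↔ z ∈ acc ∨ z ∈ xs) := by
  induction xs with
  | nil => simp
  | cons x xs ih =>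
    intro acc z
    simp only [List.foldl_cons]
    split_ifs with h
    · rw [ih]
      constructor
      · rintro (hz | hz)
        · exact Or.inl hz
        · exact Or.inr (List.mem_cons_of_mem _ hz)
      · rintro (hz | hz)
        · exact Or.inl hz
        · rcases List.mem_cons.mp hz with rfl | hz
          · exact Or.inl h
          · exact Or.inr hz
    · rw [ih]
      simp only [List.mem_append, List.mem_cons]
      tauto

lemma dedup_nodup (xs : List Int) : ∀ (acc : List Int), acc.Nodup →
    (xs.foldl (fun acc e => if e ∈ acc then acc else acc ++ [e]) acc).Nodup := by
  induction xs with
  | nil => exact fun acc h => h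
  | cons x xs ih =>
    intro acc h
    simp only [List.foldl_cons]
    split_ifs with hx
    · exact ih acc h
    · refine ih _ ?_
      rw [List.nodup_append]
      refine ⟨h, List.nodup_singleton x, ?_⟩
      intro a ha b hb
      rcases List.mem_singleton.mp hb with rfl
      exact fun he => hx (he ▸ ha)

-- the minimum of a strictly descending list is its last element
lemma pairwise_gt_getLast_le : ∀ (acc : List Int), acc.Pairwise (· > ·) →
    ∀ (hne : acc ≠ []) (a : Int), a ∈ acc → acc.getLast hne ≤ a := by
  intro acc
  induction acc with
  | nil => intro _ hne; exact absurd rfl hne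
  | cons x t iht =>
    intro h hne a ha
    cases t with
    | nil =>
      rcases List.mem_singleton.mp ha with rfl
      simp
    | cons y ts =>
      rw [List.getLast_cons (show (y :: ts) ≠ [] by simp)]
      rcases List.mem_cons.mp ha with rfl | ha'
      · exact le_of_lt ((List.pairwise_cons.mp h).1 _ (List.getLast_mem _))
      · exact iht (List.pairwise_cons.mp h).2 (by simp) a ha'

-- B's pass: adjacent dedup of a weakly descending list is strictly descending, same members
lemma adj_fold (s : List Int) : ∀ (acc : List Int), s.Pairwise (· ≥ ·) → acc.Pairwise (· > ·) →
    (∀ h : acc ≠ [], ∀ y ∈ s, y ≤ acc.getLast h) →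
    ((s.foldl (fun res x => if res = [] ∨ x ≠ PySem.List.pyGetD res (-1) 0 then res ++ [x] else res) acc).Pairwise (· > ·) ∧
     (∀ z, z ∈ s.foldl (fun res x => if res = [] ∨ x ≠ PySem.List.pyGetD res (-1) 0 then res ++ [x] else res) acc ↔ z ∈ acc ∨ z ∈ s)) := by
  induction s with
  | nil => exact fun acc _ hacc _ => ⟨hacc, by simp⟩
  | cons x rest ih =>
    intro acc hs hacc hlast
    simp only [List.foldl_cons]
    have hs' : rest.Pairwise (· ≥ ·) := (List.pairwise_cons.mp hs).2
    have hxrest : ∀ y ∈ rest, y ≤ x := fun y hy => (List.pairwise_cons.mp hs).1 y hy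
    by_cases hc : acc = [] ∨ x ≠ PySem.List.pyGetD acc (-1) 0
    · rw [if_pos hc]
      have hacc' : (acc ++ [x]).Pairwise (· > ·) := by
        rw [List.pairwise_append]
        refine ⟨hacc, List.pairwise_singleton _ _, ?_⟩
        intro a ha x' hx'
        rcases List.mem_singleton.mp hx' with rfl
        rcases hc with hc | hc
        · subst hc; simp at ha
        · have hne : acc ≠ [] := by rintro rfl; simp at ha
          rw [PySem.List.pyGetD_neg_one (h := hne)] at hc
          have hle : x' ≤ acc.getLast hne := hlast hne x' List.mem_cons_self
          have hlt : x' < acc.getLast hne := lt_of_le_of_ne hle hc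
          exact lt_of_lt_of_le hlt (pairwise_gt_getLast_le acc hacc hne a ha)
      have hlast' : ∀ h : acc ++ [x] ≠ [], ∀ y ∈ rest, y ≤ (acc ++ [x]).getLast h := by
        intro h y hy
        rw [List.getLast_append_singleton]
        exact hxrest y hy
      obtain ⟨h1, h2⟩ := ih (acc ++ [x]) hs' hacc' hlast'
      refine ⟨h1, fun z => ?_⟩
      rw [h2]
      simp only [List.mem_append, List.mem_singleton, List.mem_cons]
      tauto
    · rw [if_neg hc]
      push_neg at hc
      obtain ⟨hne, hxeq⟩ := hc
      rw [PySem.List.pyGetD_neg_one (h := hne)] at hxeq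
      have hxmem : x ∈ acc := hxeq ▸ List.getLast_mem hne
      obtain ⟨h1, h2⟩ := ih acc hs' hacc (fun h y hy => hlast h y (List.mem_cons_of_mem _ hy))
      refine ⟨h1, fun z => ?_⟩
      rw [h2]
      simp only [List.mem_cons]
      constructor
      · rintro (hz | hz)
        · exact Or.inl hz
        · exact Or.inr (Or.inr hz)
      · rintro (hz | rfl | hz)
        · exact Or.inl hz
        · exact Or.inl hxmem
        · exact Or.inr hz

-- ===== VERDICT (by name: the statement is the Claim_ definition above) =====
theorem combine_and_sort_lists_spec : Claim_equal_combine_and_sort_lists := by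
  intro list1 list2 _
  unfold Spec_combine_and_sort_lists
  set c := list1 ++ list2 with hc
  set u := c.foldl (fun acc e => if e ∈ acc then acc else acc ++ [e]) [] with hu
  have hA : combine_and_sort_lists list1 list2 = selSort u := by
    simp only [combine_and_sort_lists]
    rw [← hc, ← hu]
    have := outer_eq u.length [] u (le_refl _)
    simpa using this
  set s := PySem.List.sorted c (fun x => x) true with hsdef
  have hs : s.Pairwise (· ≥ ·) := by
    rw [hsdef]
    exact (PySem.List.sorted_pairwise_rev c (fun x => x)).imp (fun h => h)
  obtain ⟨hBpw, hBmem⟩ := adj_fold s [] hs (by simp) (by intro h; simp at h)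
  have hB : combine_and_sort_lists_alt list1 list2
      = s.foldl (fun res x => if res = [] ∨ x ≠ PySem.List.pyGetD res (-1) 0 then res ++ [x] else res) [] := rfl
  have hApw : (selSort u).Pairwise (· > ·) := selSort_pairwise u (dedup_nodup c [] (by simp))
  have hAmem : ∀ z, z ∈ selSort u ↔ z ∈ c := by
    intro z
    rw [(selSort_perm u).mem_iff, hu, dedup_mem]
    simp
  have hBmem' : ∀ z, z ∈ combine_and_sort_lists_alt list1 list2 ↔ z ∈ c := by
    intro z
    rw [hB, hBmem]
    simp [hsdef, PySem.List.mem_sorted]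
  have hAnd : (selSort u).Nodup := hApw.imp (fun h => ne_of_gt h)
  have hBnd : (combine_and_sort_lists_alt list1 list2).Nodup := by
    rw [hB]; exact hBpw.imp (fun h => ne_of_gt h)
  have hperm : (selSort u).Perm (combine_and_sort_lists_alt list1 list2) :=
    (List.perm_ext_iff_of_nodup hAnd hBnd).mpr (fun z => by rw [hAmem z, hBmem' z])
  rw [hA]
  exact List.Perm.eq_of_pairwise (fun a b _ _ h1 h2 => absurd h2 (lt_asymm h1)) hApw
    (by rw [hB]; exact hBpw) hperm
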